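-- pv_equiv track=rewrite | github.com/umeshkumar-12r/AI-Resume-Analyzer | Backend/utils.py | prioritize_missing_skills
-- ===== SOURCE A (Python) =====
-- def prioritize_missing_skills(missing_skills):
--     high_priority_keywords = [
--         "aws", "docker", "kubernetes",
--         "react", "node.js", "system design",
--         "machine learning", "sql", "mongodb",
--         "flask", "django", "api"
--         ]
--
--     medium_priority_keywords = [
--     "git", "github", "testing",
--     "ci/cd", "linux", "firebase"
--     ]
--
--     priority = {
--         "high": [],
--         "medium": [],
--         "low": []
--     }
--
--     for skill in missing_skills:
--
--         skill_lower = skill.lower()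
--
--         if skill_lower in high_priority_keywords:
--             priority["high"].append(skill)
--
--         elif skill_lower in medium_priority_keywords:
--             priority["medium"].append(skill)
--
--         else:
--             priority["low"].append(skill)
--
--     return priority
-- ===== SOURCE B (Python) =====
-- def prioritize_missing_skills(missing_skills):
--     high_priority_keywords = [
--         "aws", "docker", "kubernetes",
--         "react", "node.js", "system design",
--         "machine learning", "sql", "mongodb",
--         "flask", "django", "api"
--         ]
--
--     medium_priority_keywords = [
--     "git", "github", "testing",
--     "ci/cd", "linux", "firebase"
--     ]
--
--     # Precompute a keyword -> bucket lookup table once (hash map replaces the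
--     # repeated list-membership scans).
--     bucket_of = {kw: "high" for kw in high_priority_keywords}
--     for kw in medium_priority_keywords:
--         bucket_of[kw] = "medium"
--
--     # Decorate: label every skill with its bucket in one table-lookup pass.
--     labels = [bucket_of.get(s.lower(), "low") for s in missing_skills]
--
--     # Group: collect the skills carrying each label.
--     return {level: [s for s, b in zip(missing_skills, labels) if b == level]
--             for level in ("high", "medium", "low")}
-- ===== Notes on version B (the rewrite author's own statement) =====
-- stated objective: alternative
-- what changed: Replaces A's single loop with list-membership tests appending into dict buckets by a decorate-then-group scheme: a keyword->priority hash table is built once, every skill is labelled by one table lookup, and the three buckets are collected from the labelled pairs.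
import Mathlib
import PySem

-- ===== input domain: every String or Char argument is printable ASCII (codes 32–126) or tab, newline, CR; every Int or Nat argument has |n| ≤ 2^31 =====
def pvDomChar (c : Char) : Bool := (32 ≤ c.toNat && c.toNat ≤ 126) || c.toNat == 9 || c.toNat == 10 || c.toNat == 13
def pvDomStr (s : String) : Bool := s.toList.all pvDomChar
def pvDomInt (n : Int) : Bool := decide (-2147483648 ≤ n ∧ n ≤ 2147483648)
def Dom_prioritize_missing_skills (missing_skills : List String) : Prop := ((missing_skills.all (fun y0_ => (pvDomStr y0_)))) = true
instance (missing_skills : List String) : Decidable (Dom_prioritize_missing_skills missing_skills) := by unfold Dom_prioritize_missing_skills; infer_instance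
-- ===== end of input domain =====

-- B replaces A's membership-test loop into dict buckets by decorate-then-group over a precomputed keyword->priority table (return value only).


-- ===== PORT A =====
-- A: one loop over missing_skills, appending each skill into one bucket of a dict.
def pvHighKw : List String :=
  ["aws", "docker", "kubernetes", "react", "node.js", "system design",
   "machine learning", "sql", "mongodb", "flask", "django", "api"]

def pvMedKw : List String :=
  ["git", "github", "testing", "ci/cd", "linux", "firebase"]

def prioritize_missing_skills (missing_skills : List String) : List (String × List String) :=
  let priority : PySem.Dict String (List String) :=
    PySem.Dict.ofList [("high", []), ("medium", []), ("low", [])]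
  let final := missing_skills.foldl (fun d skill =>
    let skill_lower := PySem.Str.lower skill
    if pvHighKw.contains skill_lower then
      d.modify "high" [] (fun l => l ++ [skill])
    else if pvMedKw.contains skill_lower then
      d.modify "medium" [] (fun l => l ++ [skill])
    else
      d.modify "low" [] (fun l => l ++ [skill])) priority
  final.items

-- ===== PORT B =====
-- B: build a keyword -> bucket table once, label every skill by one lookup, then group by label.
def prioritize_missing_skills_alt (missing_skills : List String) : List (String × List String) :=
  let bucket_of : PySem.Dict String String :=
    pvMedKw.foldl (fun d kw => d.insert kw "medium")
      (pvHighKw.foldl (fun d kw => d.insert kw "high") PySem.Dict.empty)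
  let labels := missing_skills.map (fun s => bucket_of.getD (PySem.Str.lower s) "low")
  ["high", "medium", "low"].map (fun level =>
    (level, ((missing_skills.zip labels).filter (fun p => p.2 == level)).map Prod.fst))

-- ===== PRECONDITION & SPEC =====
def Spec_prioritize_missing_skills (missing_skills : List String) (out : List (String × List String)) : Prop := out = prioritize_missing_skills_alt missing_skills
instance (missing_skills : List String) (out : List (String × List String)) : Decidable (Spec_prioritize_missing_skills missing_skills out) := by unfold Spec_prioritize_missing_skills; infer_instance

-- ===== CLAIM (what is proved, stated in full; the proofs are below) =====
def Claim_equal_prioritize_missing_skills : Prop := ∀ (missing_skills : List String), Dom_prioritize_missing_skills missing_skills → Spec_prioritize_missing_skills missing_skills (prioritize_missing_skills missing_skills)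

-- ===== LEMMAS AND PROOFS =====

-- B's keyword table (a closed literal term).
def pvTable : PySem.Dict String String :=
  pvMedKw.foldl (fun d kw => d.insert kw "medium")
    (pvHighKw.foldl (fun d kw => d.insert kw "high") PySem.Dict.empty)

-- Looking a lowered skill up in B's table is A's membership cascade.
theorem pvTable_getD (s : String) :
    pvTable.getD s "low"
      = if pvHighKw.contains s then "high"
        else if pvMedKw.contains s then "medium" else "low" := by
  by_cases h1 : s ∈ pvHighKw
  · fin_cases h1 <;> decide
  · by_cases h2 : s ∈ pvMedKw
    · fin_cases h2 <;> decide
    · have hc1 : pvHighKw.contains s = false := by simpa using h1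
      have hc2 : pvMedKw.contains s = false := by simpa using h2
      rw [hc1, hc2]
      simp only [Bool.false_eq_true, reduceIte]
      have hnc : pvTable.contains s = false := by
        simp only [pvHighKw, pvMedKw, List.mem_cons, List.not_mem_nil, or_false,
          not_or] at h1 h2
        rw [show pvTable = PySem.Dict.mk
          [("aws","high"),("docker","high"),("kubernetes","high"),("react","high"),
           ("node.js","high"),("system design","high"),("machine learning","high"),
           ("sql","high"),("mongodb","high"),("flask","high"),("django","high"),
           ("api","high"),("git","medium"),("github","medium"),("testing","medium"),
           ("ci/cd","medium"),("linux","medium"),("firebase","medium")] from rfl]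
        simp [PySem.Dict.contains_mk]
        obtain ⟨a1,a2,a3,a4,a5,a6,a7,a8,a9,a10,a11,a12⟩ := h1
        obtain ⟨b1,b2,b3,b4,b5,b6⟩ := h2
        exact ⟨fun h => a1 h.symm, fun h => a2 h.symm, fun h => a3 h.symm,
          fun h => a4 h.symm, fun h => a5 h.symm, fun h => a6 h.symm,
          fun h => a7 h.symm, fun h => a8 h.symm, fun h => a9 h.symm,
          fun h => a10 h.symm, fun h => a11 h.symm, fun h => a12 h.symm,
          fun h => b1 h.symm, fun h => b2 h.symm, fun h => b3 h.symm,
          fun h => b4 h.symm, fun h => b5 h.symm, fun h => b6 h.symm⟩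
      exact PySem.Dict.getD_of_not_contains _ _ hnc

-- Decorate-then-group collapses to a single filter per label.
theorem pvZipLabel (xs : List String) (f : String → String) (level : String) :
    (((xs.zip (xs.map f)).filter (fun p => p.2 == level)).map Prod.fst)
      = xs.filter (fun s => f s == level) := by
  induction xs with
  | nil => simp
  | cons x xs ih =>
    simp only [List.map_cons, List.zip_cons_cons, List.filter_cons]
    by_cases h : f x == level
    · simp [h, ih]
    · simp only [h]
      exact ih

-- One step of A's loop on the literal three-bucket dict, per bucket.
theorem pvStep_high (h m l : List String) (x : String) :
    (PySem.Dict.mk [("high", h), ("medium", m), ("low", l)]).modify "high" []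
      (fun l => l ++ [x]) = PySem.Dict.mk [("high", h ++ [x]), ("medium", m), ("low", l)] := by
  apply PySem.Dict.ext
  simp [PySem.Dict.modify, PySem.Dict.insert, PySem.Dict.getD, PySem.Dict.get?,
    PySem.Dict.contains]

theorem pvStep_medium (h m l : List String) (x : String) :
    (PySem.Dict.mk [("high", h), ("medium", m), ("low", l)]).modify "medium" []
      (fun l => l ++ [x]) = PySem.Dict.mk [("high", h), ("medium", m ++ [x]), ("low", l)] := by
  apply PySem.Dict.ext
  simp [PySem.Dict.modify, PySem.Dict.insert, PySem.Dict.getD, PySem.Dict.get?,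
    PySem.Dict.contains]

theorem pvStep_low (h m l : List String) (x : String) :
    (PySem.Dict.mk [("high", h), ("medium", m), ("low", l)]).modify "low" []
      (fun l => l ++ [x]) = PySem.Dict.mk [("high", h), ("medium", m), ("low", l ++ [x])] := by
  apply PySem.Dict.ext
  simp [PySem.Dict.modify, PySem.Dict.insert, PySem.Dict.getD, PySem.Dict.get?,
    PySem.Dict.contains]

-- The two keyword lists are disjoint.
theorem pvKw_disjoint (s : String) : s ∈ pvHighKw → s ∉ pvMedKw := by
  intro h1
  fin_cases h1 <;> decide

-- Invariant of A's fold: starting from the three-bucket dict with contents h/m/l,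
-- the fold appends exactly the three filters of xs.
theorem pvFold_inv (xs : List String) (h m l : List String) :
    (xs.foldl (fun d skill =>
      let skill_lower := PySem.Str.lower skill
      if pvHighKw.contains skill_lower then
        d.modify "high" [] (fun l => l ++ [skill])
      else if pvMedKw.contains skill_lower then
        d.modify "medium" [] (fun l => l ++ [skill])
      else
        d.modify "low" [] (fun l => l ++ [skill]))
      (PySem.Dict.mk [("high", h), ("medium", m), ("low", l)])).items
    = [("high", h ++ xs.filter (fun s => pvHighKw.contains (PySem.Str.lower s))),
       ("medium", m ++ xs.filter (fun s => pvMedKw.contains (PySem.Str.lower s))),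
       ("low", l ++ xs.filter (fun s =>
          !(pvHighKw.contains (PySem.Str.lower s)) && !(pvMedKw.contains (PySem.Str.lower s))))] := by
  induction xs generalizing h m l with
  | nil => simp
  | cons x xs ih =>
    by_cases hh : pvHighKw.contains (PySem.Str.lower x)
    · have hm : pvMedKw.contains (PySem.Str.lower x) = false := by
        have h2 : PySem.Str.lower x ∈ pvHighKw := by simpa using hh
        simpa using pvKw_disjoint _ h2
      have hh' : PySem.Str.lower x ∈ pvHighKw := by simpa using hh
      have hm' : PySem.Str.lower x ∉ pvMedKw := by simpa using hm
      simp only [List.foldl_cons, hh, hm, Bool.false_eq_true, reduceIte]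
      rw [pvStep_high, ih]
      simp [hh', hm']
    · by_cases hm : pvMedKw.contains (PySem.Str.lower x)
      · have hh' : PySem.Str.lower x ∉ pvHighKw := by simpa using hh
        have hm' : PySem.Str.lower x ∈ pvMedKw := by simpa using hm
        simp only [List.foldl_cons, hh, hm, Bool.false_eq_true, reduceIte]
        rw [pvStep_medium, ih]
        simp [hh', hm']
      · have hh' : PySem.Str.lower x ∉ pvHighKw := by simpa using hh
        have hm' : PySem.Str.lower x ∉ pvMedKw := by simpa using hm
        simp only [List.foldl_cons, hh, hm, Bool.false_eq_true, reduceIte]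
        rw [pvStep_low, ih]
        simp [hh', hm']

-- B's per-label filter condition IS A's per-bucket condition.
theorem pvLabel_high (s : String) :
    (pvTable.getD (PySem.Str.lower s) "low" == "high")
      = pvHighKw.contains (PySem.Str.lower s) := by
  rw [pvTable_getD]
  by_cases h1 : PySem.Str.lower s ∈ pvHighKw
  · simp [h1]
  · by_cases h2 : PySem.Str.lower s ∈ pvMedKw
    · simp [h1, h2]
    · simp [h1, h2]

theorem pvLabel_medium (s : String) :
    (pvTable.getD (PySem.Str.lower s) "low" == "medium")
      = pvMedKw.contains (PySem.Str.lower s) := by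
  rw [pvTable_getD]
  by_cases h1 : PySem.Str.lower s ∈ pvHighKw
  · have h2 := pvKw_disjoint _ h1
    simp [h1, h2]
  · by_cases h2 : PySem.Str.lower s ∈ pvMedKw
    · simp [h1, h2]
    · simp [h1, h2]

theorem pvLabel_low (s : String) :
    (pvTable.getD (PySem.Str.lower s) "low" == "low")
      = (!(pvHighKw.contains (PySem.Str.lower s)) && !(pvMedKw.contains (PySem.Str.lower s))) := by
  rw [pvTable_getD]
  by_cases h1 : PySem.Str.lower s ∈ pvHighKw
  · simp [h1]
  · by_cases h2 : PySem.Str.lower s ∈ pvMedKw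
    · simp [h1, h2]
    · simp [h1, h2]

-- ===== VERDICT (by name: the statement is the Claim_ definition above) =====
theorem prioritize_missing_skills_spec : Claim_equal_prioritize_missing_skills := by
  intro missing_skills _
  unfold Spec_prioritize_missing_skills prioritize_missing_skills prioritize_missing_skills_alt
  rw [show (pvMedKw.foldl (fun d kw => d.insert kw "medium")
      (pvHighKw.foldl (fun d kw => d.insert kw "high") PySem.Dict.empty)) = pvTable from rfl]
  rw [show PySem.Dict.ofList [("high", ([] : List String)), ("medium", []), ("low", [])]
      = PySem.Dict.mk [("high", []), ("medium", []), ("low", [])] from by decide]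
  rw [pvFold_inv]
  simp only [List.map_cons, List.map_nil, pvZipLabel]
  simp only [pvLabel_high, pvLabel_medium, pvLabel_low]
  simp
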